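-- pv_equiv track=rewrite | github.com/Kronaeon/empty | PrivacyScripts/PasswordGenerator/EVAC21.py | strengthenString
-- ===== SOURCE A (Python) =====
-- def strengthenString(prtsOfStri):
--     symlist = list(r'!$*-#&?){.')
--     symbolDictionary = dict(map(lambda x: (str(x[0]), x[1]), enumerate(symlist)))
--     symbolDictRev = {key: value[::-1] for key, value in symbolDictionary.items()}
--     def symbolize(striPart_abcd, symbolDict):
--         for key, value in symbolDict.items():
--             striPart_abcd = striPart_abcd.replace(key, value)
--         return striPart_abcd
--
--     def capitalize(striPart_abcd):
--         return striPart_abcd.upper()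
--
--     for i in range(len(prtsOfStri)):
--         if i % 2 == 0: # check if the iterator is even.
--             prtsOfStri[i] = capitalize(prtsOfStri[i])
--         else:
--             if(prtsOfStri == 'b'):
--                 prtsOfStri[i] = symbolize(prtsOfStri[i], symbolDictionary)
--             else: prtsOfStri[i] = symbolize(prtsOfStri[i], symbolDictRev)
--
--     return prtsOfStri
-- ===== SOURCE B (Python) =====
-- _SYM = '!$*-#&?){.'
--
-- def strengthenString(prtsOfStri):
--     # Consume the parts pairwise through an iterator (uppercase part, symbolized part),
--     # building an accumulator; assign back in place to keep A's mutation and returned identity.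
--     out = []
--     it = iter(prtsOfStri)
--     for even in it:
--         out.append(even.upper())
--         odd = next(it, None)
--         if odd is None:
--             break
--         out.append(''.join(_SYM[ord(c) - 48] if '0' <= c <= '9' else c for c in odd))
--     prtsOfStri[:] = out
--     return prtsOfStri
-- ===== Notes on version B (the rewrite author's own statement) =====
-- stated objective: alternative
-- what changed: Instead of indexing the list and testing parity with ten chained full-string .replace passes per odd part, B consumes the parts pairwise through an iterator (no index, no parity test), symbolizes digits by arithmetic indexing into the symbol string in one per-character pass, and assigns the accumulated result back in place.
import Mathlib
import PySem

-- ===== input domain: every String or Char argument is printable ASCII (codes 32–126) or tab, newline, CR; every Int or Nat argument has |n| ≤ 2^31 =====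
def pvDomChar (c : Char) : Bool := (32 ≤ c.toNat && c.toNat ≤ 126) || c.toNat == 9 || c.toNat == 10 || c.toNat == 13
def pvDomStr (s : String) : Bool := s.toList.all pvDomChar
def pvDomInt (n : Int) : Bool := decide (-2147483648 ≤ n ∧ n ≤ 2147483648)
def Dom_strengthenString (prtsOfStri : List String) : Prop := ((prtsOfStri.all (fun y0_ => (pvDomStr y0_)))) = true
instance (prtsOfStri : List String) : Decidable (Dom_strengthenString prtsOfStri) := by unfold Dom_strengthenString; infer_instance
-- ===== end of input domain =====

set_option maxRecDepth 4000


-- ===== PORT A =====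
-- B consumes the parts pairwise through an iterator and symbolizes digits by arithmetic
-- indexing into the symbol string (objective: alternative). Python A mutates its argument
-- in place and returns it; B performs the same in-place mutation in Python; the equivalence
-- proved here is about the return value.

-- symlist = list(r'!$*-#&?){.')  (a Python list of 1-character strings)
def pySymlist : List String := ["!", "$", "*", "-", "#", "&", "?", ")", "{", "."]

-- symbolDictionary = dict(map(lambda x: (str(x[0]), x[1]), enumerate(symlist)))
def pySymbolDictionary : PySem.Dict String String :=
  PySem.Dict.ofList ((PySem.List.enumerate pySymlist).map (fun x => (PySem.Int.toStr x.1, x.2)))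

-- symbolDictRev = {key: value[::-1] for key, value in symbolDictionary.items()}
-- (value[::-1] is the step -1 slice; step ≠ 0, so slice? is never none and the getD "" is inert)
def pySymbolDictRev : PySem.Dict String String :=
  PySem.Dict.ofList (pySymbolDictionary.items.map
    (fun kv => (kv.1, (PySem.Str.slice? kv.2 none none (-1)).getD "")))

-- def symbolize(striPart_abcd, symbolDict): for key, value in symbolDict.items(): … = ….replace(key, value)
def pySymbolize (s : String) (d : PySem.Dict String String) : String :=
  d.items.foldl (fun acc kv => PySem.Str.replace acc kv.1 kv.2) s

-- Python's `prtsOfStri == 'b'` compares a list with a str: always False (exact cross-type ==).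
def pyListEqStr (_ : List String) (_ : String) : Bool := false

-- for i in range(len(prtsOfStri)): … prtsOfStri[i] = …   (indices 0..len-1 are always in
-- range: each assignment preserves the length, so ys.getD i "" reads exactly Python's prtsOfStri[i])
def strengthenString (prtsOfStri : List String) : List String :=
  (List.range prtsOfStri.length).foldl
    (fun ys i =>
      if i % 2 == 0 then ys.set i (PySem.Str.upper (ys.getD i ""))
      else if pyListEqStr ys "b" then ys.set i (pySymbolize (ys.getD i "") pySymbolDictionary)
      else ys.set i (pySymbolize (ys.getD i "") pySymbolDictRev))
    prtsOfStri

-- ===== PORT B =====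
-- _SYM = '!$*-#&?){.'
def pvSym : List Char := ['!', '$', '*', '-', '#', '&', '?', ')', '{', '.']

-- _SYM[ord(c) - 48] if '0' <= c <= '9' else c  (the index is in range exactly on the digits)
def bChar (c : Char) : Char :=
  if '0' ≤ c ∧ c ≤ '9' then pvSym.getD (c.toNat - 48) c else c

-- ''.join(_SYM[ord(c) - 48] if '0' <= c <= '9' else c for c in odd)
def bOdd (s : String) : String := String.ofList (s.toList.map bChar)

-- the `for even in it:` loop consuming the iterator two parts at a time, as structural
-- recursion two elements at a time (the accumulator appends become the list built up front)
def bGo : List String → List String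
  | [] => []
  | [x] => [PySem.Str.upper x]
  | x :: y :: rest => PySem.Str.upper x :: bOdd y :: bGo rest

def strengthenString_alt (prtsOfStri : List String) : List String := bGo prtsOfStri

-- ===== PRECONDITION & SPEC =====
def Spec_strengthenString (prtsOfStri : List String) (out : List String) : Prop := out = strengthenString_alt prtsOfStri
instance (prtsOfStri : List String) (out : List String) : Decidable (Spec_strengthenString prtsOfStri out) := by unfold Spec_strengthenString; infer_instance

-- ===== CLAIM (what is proved, stated in full; the proofs are below) =====
def Claim_equal_strengthenString : Prop := ∀ (prtsOfStri : List String), Dom_strengthenString prtsOfStri → Spec_strengthenString prtsOfStri (strengthenString prtsOfStri)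

-- ===== LEMMAS AND PROOFS =====

-- The common normal form both ports are reduced to.
def normF (i : Nat) (s : String) : String :=
  if i % 2 == 0 then PySem.Str.upper s else bOdd s

-- The digit→symbol pairs of symbolDictRev, as characters.
def subPairs : List (Char × Char) :=
  [('0','!'),('1','$'),('2','*'),('3','-'),('4','#'),('5','&'),('6','?'),('7',')'),('8','{'),('9','.')]

-- Python str.replace with single-character pattern and replacement is a per-character map.
lemma go_single (k v : Char) : ∀ (l acc : List Char),
    PySem.Chars.replace.go [k] [v] l.length l acc
      = acc.reverse ++ l.map (fun c => if c == k then v else c)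
  | [], acc => by simp [PySem.Chars.replace.go]
  | c :: t, acc => by
      by_cases h : c = k
      · simp [PySem.Chars.replace.go, List.isPrefixOf, h, go_single k v t (v :: acc)]
      · simp [PySem.Chars.replace.go, List.isPrefixOf, h, go_single k v t (c :: acc), Ne.symm h]

lemma replace_one (k v : Char) (cs : List Char) :
    PySem.Chars.replace cs [k] [v] = cs.map (fun c => if c == k then v else c) := by
  simp [PySem.Chars.replace, go_single]

lemma items_rev : pySymbolDictRev.items
    = subPairs.map (fun p => (String.ofList [p.1], String.ofList [p.2])) := by decide

lemma fold_str : ∀ (ps : List (Char × Char)) (s : String),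
    ps.foldl (fun acc p => PySem.Str.replace acc (String.ofList [p.1]) (String.ofList [p.2])) s
      = String.ofList (ps.foldl (fun cs p => PySem.Chars.replace cs [p.1] [p.2]) s.toList)
  | [], s => by simp
  | p :: t, s => by
      simp only [List.foldl_cons, fold_str t]
      congr 1
      simp [PySem.Str.toList_replace]

lemma fold_chars (ps : List (Char × Char)) : ∀ (cs : List Char),
    ps.foldl (fun cs p => PySem.Chars.replace cs [p.1] [p.2]) cs
      = cs.map (fun c => ps.foldl (fun c p => if c == p.1 then p.2 else c) c) := by
  induction ps with
  | nil => intro cs; simp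
  | cons p t ih =>
      intro cs
      simp only [List.foldl_cons]
      rw [ih, replace_one, List.map_map]
      rfl

-- The ten substitutions chained left-to-right agree with B's arithmetic table lookup:
-- no substituted symbol is itself a digit, so later passes never touch earlier output.
lemma elem_chain (c : Char) :
    subPairs.foldl (fun c p => if c == p.1 then p.2 else c) c = bChar c := by
  by_cases h0 : c = '0'; · subst h0; rfl
  by_cases h1 : c = '1'; · subst h1; rfl
  by_cases h2 : c = '2'; · subst h2; rfl
  by_cases h3 : c = '3'; · subst h3; rfl
  by_cases h4 : c = '4'; · subst h4; rfl
  by_cases h5 : c = '5'; · subst h5; rfl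
  by_cases h6 : c = '6'; · subst h6; rfl
  by_cases h7 : c = '7'; · subst h7; rfl
  by_cases h8 : c = '8'; · subst h8; rfl
  by_cases h9 : c = '9'; · subst h9; rfl
  have hnd : ¬('0' ≤ c ∧ c ≤ '9') := by
    rintro ⟨hl, hr⟩
    have hl' : 48 ≤ c.toNat := hl
    have hr' : c.toNat ≤ 57 := hr
    have : c.toNat = 48 ∨ c.toNat = 49 ∨ c.toNat = 50 ∨ c.toNat = 51 ∨ c.toNat = 52 ∨
        c.toNat = 53 ∨ c.toNat = 54 ∨ c.toNat = 55 ∨ c.toNat = 56 ∨ c.toNat = 57 := by omega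
    rcases this with h|h|h|h|h|h|h|h|h|h <;>
      first
      | exact h0 (Char.ext (UInt32.toNat_inj.mp h))
      | exact h1 (Char.ext (UInt32.toNat_inj.mp h))
      | exact h2 (Char.ext (UInt32.toNat_inj.mp h))
      | exact h3 (Char.ext (UInt32.toNat_inj.mp h))
      | exact h4 (Char.ext (UInt32.toNat_inj.mp h))
      | exact h5 (Char.ext (UInt32.toNat_inj.mp h))
      | exact h6 (Char.ext (UInt32.toNat_inj.mp h))
      | exact h7 (Char.ext (UInt32.toNat_inj.mp h))
      | exact h8 (Char.ext (UInt32.toNat_inj.mp h))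
      | exact h9 (Char.ext (UInt32.toNat_inj.mp h))
  simp [subPairs, bChar, h0,h1,h2,h3,h4,h5,h6,h7,h8,h9, hnd]

lemma symbolize_eq (s : String) : pySymbolize s pySymbolDictRev = bOdd s := by
  unfold pySymbolize bOdd
  rw [items_rev, List.foldl_map]
  rw [show (fun (x : String) (y : Char × Char) =>
        (fun acc kv => PySem.Str.replace acc kv.1 kv.2) x
          ((fun p => (String.ofList [p.1], String.ofList [p.2])) y))
      = (fun acc p => PySem.Str.replace acc (String.ofList [p.1]) (String.ofList [p.2])) from rfl]
  rw [fold_str, fold_chars]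
  exact congrArg String.ofList (List.map_congr_left (fun c _ => elem_chain c))

-- A's in-place loop in canonical form: each step updates index i from the current value at i.
lemma foldl_set_shift (G : Nat → String → String) (l : List Nat) (h : String) (t : List String) :
    l.foldl (fun ys i => ys.set (i+1) (G i (ys.getD (i+1) ""))) (h :: t)
      = h :: l.foldl (fun ys i => ys.set i (G i (ys.getD i ""))) t := by
  induction l generalizing t with
  | nil => rfl
  | cons i l ih => simp only [List.foldl_cons, List.getD_cons_succ, List.set_cons_succ, ih]

lemma foldl_set_range : ∀ (xs : List String) (g : Nat → String → String),
      (List.range xs.length).foldl (fun ys i => ys.set i (g i (ys.getD i ""))) xs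
        = xs.mapIdx g
  | [], g => rfl
  | x :: t, g => by
      rw [List.length_cons, List.range_succ_eq_map, List.foldl_cons]
      have h1 : (x :: t).set 0 (g 0 ((x :: t).getD 0 "")) = g 0 x :: t := rfl
      rw [h1, List.foldl_map]
      have h2 : (fun (ys : List String) (i : Nat) =>
          ys.set i.succ (g i.succ (ys.getD i.succ ""))) = fun ys i =>
          ys.set (i+1) ((fun j => g (j+1)) i (ys.getD (i+1) "")) := rfl
      rw [h2, foldl_set_shift, foldl_set_range t fun i => g (i+1), List.mapIdx_cons]

-- B's pairwise recursion computes the even/odd mapIdx.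
lemma bGo_eq : ∀ (xs : List String), bGo xs = xs.mapIdx normF
  | [] => rfl
  | [x] => by simp [bGo, normF]
  | x :: y :: rest => by
      rw [bGo, bGo_eq rest, List.mapIdx_cons, List.mapIdx_cons]
      have h2 : (fun i => (fun i => normF (i + 1)) (i + 1)) = normF := by
        funext i s
        simp only [normF]
        have : (i + 1 + 1) % 2 = i % 2 := by omega
        rw [this]
      simp [normF, h2]

-- ===== VERDICT (by name: the statement is the Claim_ definition above) =====
theorem strengthenString_spec : Claim_equal_strengthenString := by
  intro xs _
  unfold Spec_strengthenString strengthenString strengthenString_alt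
  rw [show (fun (ys : List String) (i : Nat) =>
      if i % 2 == 0 then ys.set i (PySem.Str.upper (ys.getD i ""))
      else if pyListEqStr ys "b" then ys.set i (pySymbolize (ys.getD i "") pySymbolDictionary)
      else ys.set i (pySymbolize (ys.getD i "") pySymbolDictRev))
    = (fun ys i => ys.set i (normF i (ys.getD i ""))) from by
      funext ys i
      by_cases h : i % 2 == 0 <;> simp [h, pyListEqStr, normF, symbolize_eq]]
  rw [foldl_set_range xs normF, bGo_eq]
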